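-- pv_equiv track=rewrite | github.com/tigantic/physics-os | proofs/yang_mills/core/yangmills_4d_qtt.py | morton_encode_4d
-- ===== SOURCE A (Python) =====
-- def morton_encode_4d(x: int, y: int, z: int, t: int, n_bits: int) -> int:
--     """Encode 4D coordinates to Morton order."""
--     result = 0
--     for b in range(n_bits):
--         result |= ((x >> b) & 1) << (4 * b + 0)
--         result |= ((y >> b) & 1) << (4 * b + 1)
--         result |= ((z >> b) & 1) << (4 * b + 2)
--         result |= ((t >> b) & 1) << (4 * b + 3)
--     return result
-- ===== SOURCE B (Python) =====
-- def _spread4(v):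
--     """Spread the bits of nonnegative v so that bit i lands at position 4*i."""
--     r = 0
--     shift = 0
--     while v:
--         r |= (v & 1) << shift
--         v >>= 1
--         shift += 4
--     return r
--
--
-- def morton_encode_4d(x: int, y: int, z: int, t: int, n_bits: int) -> int:
--     """Encode 4D coordinates to Morton order."""
--     m = 1 << max(n_bits, 0)  # keep only the low n_bits bits of each coordinate
--     # the four spread values occupy disjoint bit positions, so + combines them
--     return (_spread4(x % m)
--             + (_spread4(y % m) << 1)
--             + (_spread4(z % m) << 2)
--             + (_spread4(t % m) << 3))
-- ===== Notes on version B (the rewrite author's own statement) =====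
-- stated objective: faster
-- what changed: Per-axis strategy: each coordinate is reduced to its low n_bits bits with one modulus, a helper spreads those bits (bit i to position 4*i) by looping over the value itself until it is exhausted, and the four spread words are combined in one shifted sum - instead of A's single loop over all n_bits indices ORing four bits per index.
import Mathlib
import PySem

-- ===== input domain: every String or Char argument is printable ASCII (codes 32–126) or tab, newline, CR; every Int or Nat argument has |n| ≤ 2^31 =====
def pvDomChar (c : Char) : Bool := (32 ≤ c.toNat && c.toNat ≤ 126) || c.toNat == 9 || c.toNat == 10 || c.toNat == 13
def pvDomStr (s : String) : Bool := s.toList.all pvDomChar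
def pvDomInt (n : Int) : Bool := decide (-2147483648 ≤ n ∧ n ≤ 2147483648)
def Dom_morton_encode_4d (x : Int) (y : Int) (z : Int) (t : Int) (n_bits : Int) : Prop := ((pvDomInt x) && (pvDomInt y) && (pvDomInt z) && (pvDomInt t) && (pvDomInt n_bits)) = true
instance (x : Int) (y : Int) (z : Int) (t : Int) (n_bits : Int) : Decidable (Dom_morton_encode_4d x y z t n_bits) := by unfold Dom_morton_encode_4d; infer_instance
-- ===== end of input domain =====

-- B keeps only the low n_bits bits of each coordinate with one modulus, spreads each
-- coordinate's bits in a per-axis helper loop and combines the four spread words in one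
-- shifted sum — an alternative per-axis strategy replacing A's single indexed bit loop.

-- ===== PORT A =====
def morton_encode_4d (x : Int) (y : Int) (z : Int) (t : Int) (n_bits : Int) : Int :=
  -- for b in range(n_bits): result |= ((x >> b) & 1) << (4*b+0); …
  -- (b ≥ 0 throughout the range, so b.toNat / (4*b+k).toNat are exact; Lean's core
  --  Int-by-Nat shifts are Python's >> and << for those nonnegative amounts)
  (PySem.List.pyRange 0 n_bits 1).foldl (fun (result b : Int) =>
    let r0 := PySem.Int.bor result ((PySem.Int.band (x >>> b.toNat) 1) <<< ((4 * b + 0).toNat))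
    let r1 := PySem.Int.bor r0 ((PySem.Int.band (y >>> b.toNat) 1) <<< ((4 * b + 1).toNat))
    let r2 := PySem.Int.bor r1 ((PySem.Int.band (z >>> b.toNat) 1) <<< ((4 * b + 2).toNat))
    PySem.Int.bor r2 ((PySem.Int.band (t >>> b.toNat) 1) <<< ((4 * b + 3).toNat))) 0

-- ===== PORT B =====
-- _spread4's while loop; its argument v = coordinate % m is ≥ 0, so Nat carries it exactly,
-- and the shift counter starts at 0 and only grows by 4, so it is a Nat as well
def pvSpread4Loop (v : Nat) (shift : Nat) (r : Int) : Int :=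
  if v = 0 then r
  else pvSpread4Loop (v / 2) (shift + 4) (PySem.Int.bor r (((v % 2 : Nat) : Int) <<< shift))
termination_by v
decreasing_by exact Nat.div_lt_self (Nat.pos_of_ne_zero (by assumption)) (by decide)

def morton_encode_4d_alt (x : Int) (y : Int) (z : Int) (t : Int) (n_bits : Int) : Int :=
  let m : Int := 1 <<< ((max n_bits 0).toNat)   -- m = 1 << max(n_bits, 0); the max is ≥ 0, toNat exact
  -- x % m ≥ 0 (m > 0), so .toNat hands the loop the exact Python value
  (pvSpread4Loop (PySem.Int.mod x m).toNat 0 0)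
    + (pvSpread4Loop (PySem.Int.mod y m).toNat 0 0 <<< 1)
    + (pvSpread4Loop (PySem.Int.mod z m).toNat 0 0 <<< 2)
    + (pvSpread4Loop (PySem.Int.mod t m).toNat 0 0 <<< 3)

-- ===== PRECONDITION & SPEC =====
def Spec_morton_encode_4d (x : Int) (y : Int) (z : Int) (t : Int) (n_bits : Int) (out : Int) : Prop := out = morton_encode_4d_alt x y z t n_bits
instance (x : Int) (y : Int) (z : Int) (t : Int) (n_bits : Int) (out : Int) : Decidable (Spec_morton_encode_4d x y z t n_bits out) := by unfold Spec_morton_encode_4d; infer_instance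

-- ===== CLAIM (what is proved, stated in full; the proofs are below) =====
def Claim_equal_morton_encode_4d : Prop := ∀ (x : Int) (y : Int) (z : Int) (t : Int) (n_bits : Int), Dom_morton_encode_4d x y z t n_bits → Spec_morton_encode_4d x y z t n_bits (morton_encode_4d x y z t n_bits)

-- ===== LEMMAS AND PROOFS =====

-- bit i of v, as the integer 0 or 1
def pvBit (v : Int) (i : Nat) : Int := (v / 2 ^ i) % 2

-- contribution of bit index i to the Morton code
def pvTerm (x y z t : Int) (i : Nat) : Int :=
  pvBit x i * 2 ^ (4 * i) + pvBit y i * 2 ^ (4 * i + 1)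
    + pvBit z i * 2 ^ (4 * i + 2) + pvBit t i * 2 ^ (4 * i + 3)

-- reference value: the Morton code of the low N bits
def pvSA (x y z t : Int) (N : Nat) : Int := ((List.range N).map (pvTerm x y z t)).sum

-- pure value of the spread of v (bit i of v at position 4*i)
def pvSpread (v : Nat) : Nat :=
  if v = 0 then 0 else v % 2 + 16 * pvSpread (v / 2)
termination_by v
decreasing_by exact Nat.div_lt_self (Nat.pos_of_ne_zero (by assumption)) (by decide)

theorem pvBit_nonneg (v : Int) (i : Nat) : 0 ≤ pvBit v i :=
  Int.emod_nonneg _ (by positivity)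

theorem pvBit_le_one (v : Int) (i : Nat) : pvBit v i ≤ 1 := by
  have := Int.emod_lt_of_pos (v / 2 ^ i) (b := 2) (by norm_num); unfold pvBit; omega

-- OR of a value below 2^s with a nonnegative value shifted to position s is addition
theorem pv_bor_bit (r c : Int) (s : Nat) (hr0 : 0 ≤ r) (hr : r < 2 ^ s)
    (hc0 : 0 ≤ c) : PySem.Int.bor r (c <<< s) = r + c * 2 ^ s := by
  have h1 : c <<< s = ((c.toNat * 2 ^ s : Nat) : Int) := by
    rw [Int.shiftLeft_eq]; push_cast [Int.toNat_of_nonneg hc0]; ring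
  have h2 : r = ((r.toNat : Nat) : Int) := (Int.toNat_of_nonneg hr0).symm
  rw [h1, h2, PySem.Int.bor_natCast]
  have hcast : ((2:Int) ^ s) = ((2 ^ s : Nat) : Int) := by push_cast; ring
  have hlt : r.toNat < 2 ^ s := by omega
  have : r.toNat ||| c.toNat * 2 ^ s = r.toNat + c.toNat * 2 ^ s := by
    rw [Nat.lor_comm, Nat.mul_comm, ← Nat.two_pow_add_eq_or_of_lt hlt c.toNat]
    omega
  rw [this]; push_cast [Int.toNat_of_nonneg hc0, Int.toNat_of_nonneg hr0]; ring

theorem pvSpread_step (v : Nat) : pvSpread v = v % 2 + 16 * pvSpread (v / 2) := by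
  rw [pvSpread]; by_cases h : v = 0
  · simp [h, pvSpread]
  · simp [h]

theorem pvSpread4Loop_eq (v : Nat) : ∀ (s : Nat) (r : Int), 0 ≤ r → r < 2 ^ s →
    pvSpread4Loop v s r = r + (pvSpread v : Int) * 2 ^ s := by
  induction v using Nat.strong_induction_on with
  | _ v ih =>
    intro s r hr0 hr
    rw [pvSpread4Loop]
    by_cases h : v = 0
    · simp [h, pvSpread]
    · simp only [h, if_false]
      rw [pv_bor_bit r ((v % 2 : Nat) : Int) s hr0 hr (by positivity)]
      have hlt : v / 2 < v := Nat.div_lt_self (Nat.pos_of_ne_zero h) (by decide)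
      have h1 : (0:Int) ≤ r + ((v % 2 : Nat) : Int) * 2 ^ s := by positivity
      have h2 : r + ((v % 2 : Nat) : Int) * 2 ^ s < 2 ^ (s + 4) := by
        have hm : ((v % 2 : Nat) : Int) ≤ 1 := by
          have := Nat.mod_lt v (y := 2) (by decide)
          exact_mod_cast Nat.le_of_lt_succ this
        have hp : (0:Int) < 2 ^ s := by positivity
        have hb : ((v % 2 : Nat) : Int) * 2 ^ s ≤ 2 ^ s := by nlinarith
        have h16 : (2:Int) ^ (s + 4) = 16 * 2 ^ s := by ring
        linarith
      rw [ih (v / 2) hlt (s + 4) _ h1 h2, pvSpread_step v]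
      push_cast
      ring

theorem pvTerm_nonneg (x y z t : Int) (i : Nat) : 0 ≤ pvTerm x y z t i := by
  have hx := pvBit_nonneg x i; have hy := pvBit_nonneg y i
  have hz := pvBit_nonneg z i; have ht := pvBit_nonneg t i
  unfold pvTerm; positivity

theorem pvTerm_lt (x y z t : Int) (i : Nat) : pvTerm x y z t i < 15 * 2 ^ (4 * i) + 1 := by
  have h1 := pvBit_le_one x i; have h2 := pvBit_le_one y i
  have h3 := pvBit_le_one z i; have h4 := pvBit_le_one t i
  have h1' := pvBit_nonneg x i; have h2' := pvBit_nonneg y i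
  have h3' := pvBit_nonneg z i; have h4' := pvBit_nonneg t i
  have hp : (0:Int) < 2 ^ (4*i) := by positivity
  unfold pvTerm
  have e1 : (2:Int) ^ (4*i+1) = 2 * 2 ^ (4*i) := by ring
  have e2 : (2:Int) ^ (4*i+2) = 4 * 2 ^ (4*i) := by ring
  have e3 : (2:Int) ^ (4*i+3) = 8 * 2 ^ (4*i) := by ring
  rw [e1, e2, e3]; nlinarith

theorem pvSA_nonneg (x y z t : Int) (N : Nat) : 0 ≤ pvSA x y z t N := by
  unfold pvSA
  induction N with
  | zero => simp
  | succ n ih =>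
    rw [List.range_succ]
    simp only [List.map_append, List.sum_append, List.map_cons, List.map_nil,
      List.sum_cons, List.sum_nil]
    have := pvTerm_nonneg x y z t n; omega

theorem pvSA_succ (x y z t : Int) (N : Nat) :
    pvSA x y z t (N + 1) = pvSA x y z t N + pvTerm x y z t N := by
  unfold pvSA; rw [List.range_succ]; simp

theorem pvSA_lt (x y z t : Int) (N : Nat) : pvSA x y z t N < 2 ^ (4 * N) := by
  induction N with
  | zero => simp [pvSA]
  | succ n ih =>
    rw [pvSA_succ]
    have := pvTerm_lt x y z t n
    have e : (2:Int) ^ (4 * (n+1)) = 16 * 2 ^ (4*n) := by ring_nf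
    rw [e] at *; omega

theorem pvBit_succ (v : Int) (i : Nat) : pvBit v (i + 1) = pvBit (v / 2) i := by
  unfold pvBit
  have : v / 2 / 2 ^ i = v / 2 ^ (i+1) := by
    rw [Int.ediv_ediv_of_nonneg (hy := by norm_num)]
    norm_num [pow_succ, mul_comm]
  rw [this]

theorem pvTerm_succ (x y z t : Int) (i : Nat) :
    pvTerm x y z t (i + 1) = 16 * pvTerm (x / 2) (y / 2) (z / 2) (t / 2) i := by
  unfold pvTerm
  rw [pvBit_succ, pvBit_succ, pvBit_succ, pvBit_succ]
  ring

theorem pvSA_succ_low (x y z t : Int) (N : Nat) :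
    pvSA x y z t (N + 1) = pvTerm x y z t 0 + 16 * pvSA (x / 2) (y / 2) (z / 2) (t / 2) N := by
  unfold pvSA
  rw [List.range_succ_eq_map]
  simp only [List.map_cons, List.sum_cons, List.map_map]
  congr 1
  · induction N with
    | zero => simp
    | succ n ih =>
      rw [List.range_succ]
      simp only [List.map_append, List.sum_append, List.map_cons, List.map_nil,
        List.sum_cons, List.sum_nil, List.comp_map] at *
      rw [ih]
      simp [Function.comp, pvTerm_succ]
      ring

theorem pv_half_mod (x m : Int) (hm : 0 < m) : (x % (2*m)) / 2 = (x / 2) % m := by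
  have hx := Int.mul_ediv_add_emod x (2*m)
  set k := x / (2*m) with hk
  set s := x % (2*m) with hsdef
  have hs0 : 0 ≤ s := Int.emod_nonneg _ (by positivity)
  have hs : s < 2*m := Int.emod_lt_of_pos _ (by positivity)
  have h1 : x / 2 = m*k + s/2 := by
    rw [← hx, show 2*m*k + s = s + (m*k)*2 by ring, Int.add_mul_ediv_right _ _ (by norm_num)]
    ring
  rw [h1, show m*k + s/2 = s/2 + k*m by ring, Int.add_mul_emod_self_right]
  exact (Int.emod_eq_of_lt (by omega) (by omega)).symm

-- the masked-spread decomposition for one coordinate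
theorem pv_mask_step (x : Int) (N : Nat) :
    (pvSpread (x % 2 ^ (N+1)).toNat : Int)
      = x % 2 + 16 * (pvSpread ((x / 2) % 2 ^ N).toNat : Int) := by
  set u : Int := x % 2 ^ (N+1) with hu
  have hu0 : 0 ≤ u := Int.emod_nonneg _ (by positivity)
  have hdiv : u / 2 = (x / 2) % 2 ^ N := by
    rw [hu, show (2:Int) ^ (N+1) = 2 * 2 ^ N by ring, pv_half_mod x (2^N) (by positivity)]
  have h2 : u.toNat / 2 = ((x / 2) % 2 ^ N).toNat := by omega
  rw [pvSpread_step u.toNat, h2]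
  push_cast
  rw [Int.toNat_of_nonneg hu0, hu,
    Int.emod_emod_of_dvd x (Dvd.intro ((2:Int)^N) (by ring))]

-- the B side equals the reference value
theorem pvSpread_sum (N : Nat) : ∀ (x y z t : Int),
    ((pvSpread (x % 2 ^ N).toNat : Int))
      + 2 * (pvSpread (y % 2 ^ N).toNat : Int)
      + 4 * (pvSpread (z % 2 ^ N).toNat : Int)
      + 8 * (pvSpread (t % 2 ^ N).toNat : Int) = pvSA x y z t N := by
  induction N with
  | zero =>
    intro x y z t
    simp [pvSA, pvSpread]
  | succ n ih =>
    intro x y z t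
    rw [pv_mask_step x, pv_mask_step y, pv_mask_step z, pv_mask_step t,
      pvSA_succ_low, ← ih (x/2) (y/2) (z/2) (t/2)]
    have h0 : pvTerm x y z t 0 = x % 2 + 2 * (y % 2) + 4 * (z % 2) + 8 * (t % 2) := by
      unfold pvTerm pvBit
      norm_num
      ring
    rw [h0]; ring

theorem pv_band_shift (v : Int) (k : Nat) : PySem.Int.band (v >>> k) 1 = pvBit v k := by
  rw [PySem.Int.band_one, PySem.Int.mod_eq_emod_of_pos (by norm_num),
    Int.shiftRight_eq_div_pow]
  unfold pvBit
  push_cast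
  rfl

-- the A side equals the reference value
theorem pv_foldA (x y z t : Int) (N : Nat) :
    (List.range N).foldl (fun result (k : Nat) =>
      let r0 := PySem.Int.bor result (PySem.Int.band (x >>> k) 1 <<< (4 * k + 0))
      let r1 := PySem.Int.bor r0 (PySem.Int.band (y >>> k) 1 <<< (4 * k + 1))
      let r2 := PySem.Int.bor r1 (PySem.Int.band (z >>> k) 1 <<< (4 * k + 2))
      PySem.Int.bor r2 (PySem.Int.band (t >>> k) 1 <<< (4 * k + 3))) 0 = pvSA x y z t N := by
  induction N with
  | zero => simp [pvSA]
  | succ n ih =>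
    rw [List.range_succ, List.foldl_append, ih, List.foldl_cons, List.foldl_nil]
    simp only [pv_band_shift]
    have ha0 := pvSA_nonneg x y z t n
    have ha := pvSA_lt x y z t n
    have hx0 := pvBit_nonneg x n; have hx1 := pvBit_le_one x n
    have hy0 := pvBit_nonneg y n; have hy1 := pvBit_le_one y n
    have hz0 := pvBit_nonneg z n; have hz1 := pvBit_le_one z n
    have ht0 := pvBit_nonneg t n; have ht1 := pvBit_le_one t n
    have p0 : (0:Int) < 2 ^ (4*n) := by positivity
    have e1 : (2:Int) ^ (4*n+1) = 2 * 2 ^ (4*n) := by ring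
    have e2 : (2:Int) ^ (4*n+2) = 4 * 2 ^ (4*n) := by ring
    have e3 : (2:Int) ^ (4*n+3) = 8 * 2 ^ (4*n) := by ring
    have e0 : (2:Int) ^ (4*n+0) = 2 ^ (4*n) := by ring
    have bx1 : pvBit x n * 2 ^ (4*n+0) ≤ 2 ^ (4*n) := by rw [e0]; nlinarith
    have bx0 : (0:Int) ≤ pvBit x n * 2 ^ (4*n+0) := by positivity
    have by1 : pvBit y n * 2 ^ (4*n+1) ≤ 2 * 2 ^ (4*n) := by rw [e1]; nlinarith
    have by0 : (0:Int) ≤ pvBit y n * 2 ^ (4*n+1) := by positivity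
    have bz1 : pvBit z n * 2 ^ (4*n+2) ≤ 4 * 2 ^ (4*n) := by rw [e2]; nlinarith
    have bz0 : (0:Int) ≤ pvBit z n * 2 ^ (4*n+2) := by positivity
    have bt0 : (0:Int) ≤ pvBit t n * 2 ^ (4*n+3) := by positivity
    rw [pv_bor_bit _ _ _ ha0 (by omega) hx0]
    rw [pv_bor_bit _ _ _ (by linarith) (by rw [e1]; linarith) hy0]
    rw [pv_bor_bit _ _ _ (by linarith) (by rw [e2]; linarith) hz0]
    rw [pv_bor_bit _ _ _ (by linarith) (by rw [e3]; linarith) ht0]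
    rw [pvSA_succ]
    unfold pvTerm
    ring

-- ===== VERDICT (by name: the statement is the Claim_ definition above) =====
theorem pv_shift1 (s : Int) : s <<< (1:Int) = s * 2 := by
  rw [show (1:Int) = ((1:Nat):Int) by rfl, Int.shiftLeft_natCast_right, Int.shiftLeft_eq]; ring

theorem pv_shift2 (s : Int) : s <<< (2:Int) = s * 4 := by
  rw [show (2:Int) = ((2:Nat):Int) by rfl, Int.shiftLeft_natCast_right, Int.shiftLeft_eq]; norm_num

theorem pv_shift3 (s : Int) : s <<< (3:Int) = s * 8 := by
  rw [show (3:Int) = ((3:Nat):Int) by rfl, Int.shiftLeft_natCast_right, Int.shiftLeft_eq]; norm_num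

theorem morton_encode_4d_spec : Claim_equal_morton_encode_4d := by
  unfold Claim_equal_morton_encode_4d
  intro x y z t nb _
  unfold Spec_morton_encode_4d morton_encode_4d morton_encode_4d_alt
  set N : Nat := nb.toNat with hN
  -- the A side
  have hA : (PySem.List.pyRange 0 nb 1).foldl (fun (result b : Int) =>
      let r0 := PySem.Int.bor result ((PySem.Int.band (x >>> b.toNat) 1) <<< ((4 * b + 0).toNat))
      let r1 := PySem.Int.bor r0 ((PySem.Int.band (y >>> b.toNat) 1) <<< ((4 * b + 1).toNat))
      let r2 := PySem.Int.bor r1 ((PySem.Int.band (z >>> b.toNat) 1) <<< ((4 * b + 2).toNat))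
      PySem.Int.bor r2 ((PySem.Int.band (t >>> b.toNat) 1) <<< ((4 * b + 3).toNat))) 0
      = pvSA x y z t N := by
    rw [PySem.List.pyRange_one, List.foldl_map, sub_zero]
    rw [← pv_foldA x y z t N]
    apply PySem.List.foldl_congr_mem
    intro acc k _
    have hk : ((0:Int) + ((k : Nat) : Int)).toNat = k := by omega
    have e0 : (4 * ((0:Int) + ((k:Nat):Int)) + 0).toNat = 4 * k + 0 := by omega
    have e1 : (4 * ((0:Int) + ((k:Nat):Int)) + 1).toNat = 4 * k + 1 := by omega
    have e2 : (4 * ((0:Int) + ((k:Nat):Int)) + 2).toNat = 4 * k + 2 := by omega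
    have e3 : (4 * ((0:Int) + ((k:Nat):Int)) + 3).toNat = 4 * k + 3 := by omega
    simp only [hk, e0, e1, e2, e3]
  rw [hA]
  -- the B side
  have hm : (((1 <<< (max nb 0).toNat : Nat)) : Int) = 2 ^ N := by
    have h : (max nb 0).toNat = N := by omega
    rw [h, Nat.shiftLeft_eq]; push_cast; ring
  have hp : (0:Int) < 2 ^ N := by positivity
  simp only [hm, PySem.Int.mod_eq_emod_of_pos hp]
  have hL : ∀ v : Int, pvSpread4Loop (v % 2 ^ N).toNat 0 0 = (pvSpread (v % 2 ^ N).toNat : Int) := by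
    intro v
    rw [pvSpread4Loop_eq _ 0 0 le_rfl (by norm_num)]
    ring
  rw [hL x, hL y, hL z, hL t, pv_shift1, pv_shift2, pv_shift3]
  rw [← pvSpread_sum N x y z t]
  ring
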